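-- pv_equiv track=rewrite | github.com/esdralemes/exercicios-ada | listas_2.py | contar_temperatura_repetidas
-- ===== SOURCE A (Python) =====
-- def contar_temperatura_repetidas(temperaturas):
--     contagem = {}
--
--     for temperatura in temperaturas:
--         if temperatura in contagem:
--             contagem[temperatura] += 1
--         else:
--             contagem[temperatura] = 1
--
--     temperaturas_repetidas = [temp for temp, count in contagem.items() if count > 1]
--
--     if len(temperaturas_repetidas) > 0:
--         return f"Sim, existem {len(temperaturas_repetidas)} dias com temperatura média repetida."
--     else:
--         return "Não, não tem temperatura média repetida."
-- ===== SOURCE B (Python) =====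
-- def contar_temperatura_repetidas(temperaturas):
--     ordenadas = sorted(temperaturas)
--     n = 0
--     anterior = None
--     repetido = False
--     for temperatura in ordenadas:
--         if anterior == temperatura:
--             if not repetido:
--                 n += 1
--                 repetido = True
--         else:
--             anterior = temperatura
--             repetido = False
--     if n > 0:
--         return f"Sim, existem {n} dias com temperatura média repetida."
--     else:
--         return "Não, não tem temperatura média repetida."
-- ===== Notes on version B (the rewrite author's own statement) =====
-- stated objective: alternative
-- what changed: Replaces the frequency dictionary and its count>1 filtering pass with sort-then-scan: sort the list and count, in one pass over adjacent elements, the runs of length >= 2, so no dictionary or counts are ever stored.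
import Mathlib
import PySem

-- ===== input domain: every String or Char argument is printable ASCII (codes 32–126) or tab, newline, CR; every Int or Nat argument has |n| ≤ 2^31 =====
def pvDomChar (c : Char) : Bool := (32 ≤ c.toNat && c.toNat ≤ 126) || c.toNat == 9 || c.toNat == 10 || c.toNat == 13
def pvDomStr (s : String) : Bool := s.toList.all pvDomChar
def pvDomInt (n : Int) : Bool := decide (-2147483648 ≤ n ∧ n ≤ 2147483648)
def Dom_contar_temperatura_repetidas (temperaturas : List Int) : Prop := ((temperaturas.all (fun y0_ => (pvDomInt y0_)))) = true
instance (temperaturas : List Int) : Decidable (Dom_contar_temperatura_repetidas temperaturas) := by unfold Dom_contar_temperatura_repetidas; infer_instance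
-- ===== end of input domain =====

-- B replaces A's frequency dictionary + count>1 filter by sort-then-scan: sort the
-- list and count runs of length >= 2 in one pass over adjacent elements; objective: alternative.

-- ===== PORT A =====
def contar_temperatura_repetidas (temperaturas : List Int) : String :=
  let contagem : PySem.Dict Int Int :=
    temperaturas.foldl
      (fun d temperatura =>
        if d.contains temperatura then d.modify temperatura 0 (· + 1)
        else d.insert temperatura 1)
      PySem.Dict.empty
  let temperaturas_repetidas : List Int :=
    (contagem.items.filter (fun p => decide (1 < p.2))).map (fun p => p.1)
  if 0 < temperaturas_repetidas.length then
    "Sim, existem " ++ PySem.Int.toStr (temperaturas_repetidas.length : Int) ++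
      " dias com temperatura média repetida."
  else "Não, não tem temperatura média repetida."

-- ===== PORT B =====
def contar_temperatura_repetidas_alt (temperaturas : List Int) : String :=
  let ordenadas : List Int := PySem.List.sorted temperaturas (fun x => x) false
  let st : Nat × Option Int × Bool :=
    ordenadas.foldl
      (fun st temperatura =>
        if st.2.1 = some temperatura then
          if st.2.2 = false then (st.1 + 1, st.2.1, true) else st
        else (st.1, some temperatura, false))
      (0, none, false)
  let n : Nat := st.1
  if 0 < n then
    "Sim, existem " ++ PySem.Int.toStr (n : Int) ++ " dias com temperatura média repetida."
  else "Não, não tem temperatura média repetida."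

-- ===== PRECONDITION & SPEC =====
def Spec_contar_temperatura_repetidas (temperaturas : List Int) (out : String) : Prop := out = contar_temperatura_repetidas_alt temperaturas
instance (temperaturas : List Int) (out : String) : Decidable (Spec_contar_temperatura_repetidas temperaturas out) := by unfold Spec_contar_temperatura_repetidas; infer_instance

-- ===== CLAIM (what is proved, stated in full; the proofs are below) =====
def Claim_equal_contar_temperatura_repetidas : Prop := ∀ (temperaturas : List Int), Dom_contar_temperatura_repetidas temperaturas → Spec_contar_temperatura_repetidas temperaturas (contar_temperatura_repetidas temperaturas)

-- ===== LEMMAS AND PROOFS =====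

-- abstract form of B's scan: count runs of length ≥ 2 in a list
def runCount : List Int → Nat
  | x :: y :: rest =>
      if x = y then 1 + runCount (rest.dropWhile (· == x)) else runCount (y :: rest)
  | _ => 0
termination_by l => l.length
decreasing_by
  · have := List.length_dropWhile_le (· == x) rest; simp; omega
  · simp

-- the number of distinct values appearing at least twice, as a Finset card
def dupCard (l : List Int) : Nat := (l.toFinset.filter (fun k => 2 ≤ l.count k)).card

theorem mem_dupFilter (l : List Int) (k : Int) :
    k ∈ l.toFinset.filter (fun k => 2 ≤ l.count k) ↔ 2 ≤ l.count k := by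
  simp only [Finset.mem_filter, List.mem_toFinset, and_iff_right_iff_imp]
  intro h
  exact List.count_pos_iff.mp (by omega)

-- structural-recursion form of B's scan state machine
def runCountFrom (a : Option Int) (r : Bool) : List Int → Nat
  | [] => 0
  | t :: rest =>
      if a = some t then
        if r = false then 1 + runCountFrom (some t) true rest else runCountFrom a r rest
      else runCountFrom (some t) false rest

theorem runCount_nil : runCount [] = 0 := by rw [runCount.eq_def]

theorem runCount_single (x : Int) : runCount [x] = 0 := by rw [runCount.eq_def]

-- B's fold computes runCountFrom of its state
theorem pvFold_fst (l : List Int) : ∀ (n : Nat) (a : Option Int) (r : Bool),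
    (l.foldl
      (fun st temperatura =>
        if st.2.1 = some temperatura then
          if st.2.2 = false then (st.1 + 1, st.2.1, true) else st
        else (st.1, some temperatura, false))
      (n, a, r)).1 = n + runCountFrom a r l := by
  induction l with
  | nil => intro n a r; simp [runCountFrom]
  | cons t rest ih =>
      intro n a r
      simp only [List.foldl_cons, runCountFrom]
      by_cases ha : a = some t
      · by_cases hr : r = false
        · subst hr
          simp [ha, ih]
          omega
        · have hr' : r = true := by revert hr; cases r <;> simp
          subst hr'
          simp [ha, ih]
      · simp [ha, ih]

-- runCountFrom agrees with runCount
theorem runCountFrom_runCount (l : List Int) :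
    (∀ x : Int, runCountFrom (some x) false l = runCount (x :: l)) ∧
    (∀ x : Int, runCountFrom (some x) true l = runCount (l.dropWhile (· == x))) := by
  induction l with
  | nil =>
      refine ⟨fun x => ?_, fun x => ?_⟩
      · rw [runCountFrom, runCount_single]
      · rw [runCountFrom, List.dropWhile_nil, runCount_nil]
  | cons y rest ih =>
      refine ⟨fun x => ?_, fun x => ?_⟩
      · by_cases hxy : x = y
        · subst hxy
          rw [runCountFrom, if_pos rfl, if_pos rfl, (ih.2) x, runCount, if_pos rfl]
        · rw [runCountFrom, if_neg (by simpa using hxy), (ih.1) y, runCount,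
            if_neg hxy]
      · by_cases hyx : y = x
        · subst hyx
          rw [runCountFrom, if_pos rfl, if_neg (show ¬(true = false) by simp),
            List.dropWhile_cons_of_pos (by simp), (ih.2) y]
        · rw [runCountFrom, if_neg (by simpa using (Ne.symm hyx)),
            List.dropWhile_cons_of_neg (by simpa using hyx), (ih.1) y]

theorem runCountFrom_none (l : List Int) : runCountFrom none false l = runCount l := by
  cases l with
  | nil => rw [runCountFrom, runCount_nil]
  | cons y rest => rw [runCountFrom, if_neg (by simp), (runCountFrom_runCount rest).1 y]

-- on a sorted list, runCount counts the distinct values appearing at least twice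
theorem runCount_sorted (l : List Int) :
    l.Pairwise (· ≤ ·) → runCount l = dupCard l := by
  fun_induction runCount l with
  | case1 x rest ih =>
      intro hs
      have hrest : rest.Pairwise (· ≤ ·) := (List.pairwise_cons.mp (List.pairwise_cons.mp hs).2).2
      have hxrest : ∀ z ∈ rest, x ≤ z := fun z hz => (List.pairwise_cons.mp hs).1 z (.tail _ hz)
      set r' := rest.dropWhile (· == x) with hr'
      have hsub : r'.Sublist rest := List.dropWhile_sublist _
      have hr's : r'.Pairwise (· ≤ ·) := hrest.sublist hsub
      have hxr' : x ∉ r' := by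
        intro hx
        rcases hh : r' with _ | ⟨h0, t⟩
        · rw [hh] at hx; exact absurd hx List.not_mem_nil
        · have hhead : ¬ (h0 == x) = true := by
            have := List.head?_dropWhile_not (· == x) rest
            rw [← hr', hh] at this; simpa using this
          have hneq : h0 ≠ x := by simpa using hhead
          have hmemh0 : h0 ∈ rest := hsub.mem (by rw [hh]; exact .head _)
          rw [hh] at hx
          rcases List.mem_cons.mp hx with hx' | hx'
          · exact hneq hx'.symm
          · have h1 : h0 ≤ x := (List.pairwise_cons.mp (hh ▸ hr's)).1 x hx'
            exact hneq (le_antisymm h1 (hxrest _ hmemh0))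
      have hcount : ∀ k, k ≠ x → (x :: x :: rest).count k = r'.count k := by
        intro k hk
        have hsplit : rest = rest.takeWhile (· == x) ++ r' := (List.takeWhile_append_dropWhile).symm
        have htake : (rest.takeWhile (· == x)).count k = 0 := by
          rw [List.count_eq_zero]
          intro hmem
          have := List.mem_takeWhile_imp hmem
          simp at this; exact hk this
        rw [List.count_cons, List.count_cons]
        conv_lhs => rw [hsplit]
        rw [List.count_append, htake]
        have hk' : x ≠ k := Ne.symm hk
        simp [hk']
      have hset : (x :: x :: rest).toFinset.filter (fun k => 2 ≤ (x :: x :: rest).count k)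
          = insert x (r'.toFinset.filter (fun k => 2 ≤ r'.count k)) := by
        ext k
        rw [mem_dupFilter, Finset.mem_insert, mem_dupFilter]
        by_cases hk : k = x
        · subst hk
          simp only [List.count_cons_self, true_or, iff_true]
          omega
        · rw [hcount k hk]; simp [hk]
      have hnotmem : x ∉ r'.toFinset.filter (fun k => 2 ≤ r'.count k) := by
        rw [mem_dupFilter]
        have h0 : r'.count x = 0 := List.count_eq_zero.mpr hxr'
        omega
      rw [ih hr's, dupCard, dupCard, hset, Finset.card_insert_of_notMem hnotmem]
      omega
  | case2 x y rest hne ih =>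
      intro hs
      have htail : (y :: rest).Pairwise (· ≤ ·) := (List.pairwise_cons.mp hs).2
      have hxall : ∀ z ∈ y :: rest, x ≤ z := (List.pairwise_cons.mp hs).1
      have hxnot : x ∉ y :: rest := by
        intro hx
        rcases List.mem_cons.mp hx with hx' | hx'
        · exact hne hx' 
        · have hxy : x ≤ y := hxall y (.head _)
          have hyx : y ≤ x := (List.pairwise_cons.mp htail).1 x hx'
          exact hne (le_antisymm hxy hyx)
      have hset : (x :: y :: rest).toFinset.filter (fun k => 2 ≤ (x :: y :: rest).count k)
          = (y :: rest).toFinset.filter (fun k => 2 ≤ (y :: rest).count k) := by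
        ext k
        rw [mem_dupFilter, mem_dupFilter]
        by_cases hk : k = x
        · subst hk
          have h0 : (y :: rest).count k = 0 := List.count_eq_zero.mpr hxnot
          rw [List.count_cons_self, h0]
          omega
        · rw [List.count_cons_of_ne (Ne.symm hk)]
      rw [ih htail, dupCard, dupCard, hset]
  | case3 l h1 =>
      intro hs
      rcases l with _ | ⟨a, _ | ⟨b, t⟩⟩
      · simp [dupCard]
      · have hle : ∀ k : Int, [a].count k ≤ 1 := by
          intro k; by_cases h : a = k <;> simp [h]
        simp only [dupCard]
        rw [Finset.card_eq_zero.mpr]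
        ext k
        rw [mem_dupFilter]
        have := hle k
        simp; omega
      · exact absurd rfl (h1 a b t)

-- A's loop body is exactly the Counter step
theorem pvStepA_eq (d : PySem.Dict Int Int) (t : Int) :
    (if d.contains t then d.modify t 0 (· + 1) else d.insert t 1) = d.modify t 0 (· + 1) := by
  by_cases h : d.contains t = true
  · simp [h]
  · have hb : d.contains t = false := by simpa using h
    have h0 : d.getD t 0 = 0 := by rw [PySem.Dict.getD_of_not_contains]; exact hb
    simp [h, PySem.Dict.modify, h0]

-- A's list of repeated temperatures, characterised via the Counter lemmas
theorem pvA_list (ts : List Int) :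
    ((ts.foldl (fun d t => d.modify t 0 (· + 1)) (PySem.Dict.empty : PySem.Dict Int Int)).items.filter
        (fun p => decide (1 < p.2))).map (fun p => p.1)
      = (PySem.Set.ofList ts).filter (fun k => decide (1 < (ts.count k : Int))) := by
  rw [show ts.foldl (fun d t => d.modify t 0 (· + 1)) (PySem.Dict.empty : PySem.Dict Int Int)
        = PySem.Dict.counter ts from rfl,
    PySem.Dict.items_counter, List.filter_map, List.map_map]
  simp [Function.comp_def]

-- the length of A's repeated list is dupCard ts
theorem pvA_len (ts : List Int) :
    ((PySem.Set.ofList ts).filter (fun k => decide (1 < (ts.count k : Int)))).length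
      = dupCard ts := by
  have hnd : ((PySem.Set.ofList ts).filter (fun k => decide (1 < (ts.count k : Int)))).Nodup :=
    (PySem.Set.nodup_ofList ts).filter _
  rw [← List.toFinset_card_of_nodup hnd, dupCard]
  congr 1
  ext k
  rw [List.mem_toFinset, List.mem_filter, PySem.Set.mem_ofList, mem_dupFilter]
  constructor
  · rintro ⟨-, h⟩; simp at h; omega
  · intro h
    exact ⟨List.count_pos_iff.mp (by omega), by simp; omega⟩

-- dupCard is invariant under permutation
theorem dupCard_perm (l l' : List Int) (hp : l.Perm l') : dupCard l = dupCard l' := by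
  unfold dupCard
  congr 1
  ext k
  rw [mem_dupFilter, mem_dupFilter, hp.count_eq]

-- ===== VERDICT (by name: the statement is the Claim_ definition above) =====
theorem contar_temperatura_repetidas_spec : Claim_equal_contar_temperatura_repetidas := by
  intro ts _
  unfold Spec_contar_temperatura_repetidas contar_temperatura_repetidas
    contar_temperatura_repetidas_alt
  have hfun : (fun (d : PySem.Dict Int Int) temperatura =>
      if d.contains temperatura then d.modify temperatura 0 (· + 1)
      else d.insert temperatura 1) = (fun d temperatura => d.modify temperatura 0 (· + 1)) :=
    funext fun d => funext fun t => pvStepA_eq d t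
  simp only [hfun, pvA_list, pvA_len]
  have hb : ((PySem.List.sorted ts (fun x => x) false).foldl
      (fun st temperatura =>
        if st.2.1 = some temperatura then
          if st.2.2 = false then (st.1 + 1, st.2.1, true) else st
        else (st.1, some temperatura, false))
      ((0 : Nat), (none : Option Int), false)).1 = dupCard ts := by
    rw [pvFold_fst, runCountFrom_none,
      runCount_sorted _ (by simpa using PySem.List.sorted_pairwise ts (fun x => x)),
      dupCard_perm _ ts (PySem.List.sorted_perm ts (fun x => x) false)]
    omega
  rw [hb]
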